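-- pv_equiv track=rewrite | github.com/ShiNera01/Algorithm | 카카오/2018 카카오 블라인드/파일명 정렬.py | solution
-- ===== SOURCE A (Python) =====
-- def solution(files):
--     answer = []
--
--     array = []
--
--
--
--     for i in range(len(files)):
--         word_list = []
--         word_1 = ""
--         word_2 = ""
--         word_3 = ""
--         flag_1 = 0
--         flag_2 = 0
--         for j in range(len(files[i])):
--
--             if files[i][j].isdigit() != True and flag_1 == 0:
--                 word_1 += files[i][j]
--             elif files[i][j].isdigit() == True and flag_2 == 0:
--                 word_2 += files[i][j]
--                 flag_1 = 1
--             else: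
--                 word_3 += files[i][j]
--                 flag_2 = 1
--
--         word_list.append(word_1.lower())
--         word_list.append(int(word_2))
--         word_list.append(word_3)
--         word_list.append(i)
--
--         array.append(word_list)
--
--     array = sorted(array, key = lambda x: (x[0],x[1],x[3]))
--
--
--
--     for i in range(len(array)):
--         answer.append(files[array[i][3]])
--
--
--     return answer
-- ===== SOURCE B (Python) =====
-- def solution(files):
--     # Decorate-sort: compute (head.lower(), number, index) key per name once, sort enumerated pairs.
--     def sort_key(pair):
--         i, name = pair
--         n = len(name)
--         s = 0
--         while s < n and not name[s].isdigit():
--             s += 1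
--         e = s
--         while e < n and name[e].isdigit():
--             e += 1
--         return (name[:s].lower(), int(name[s:e]), i)
--     return [name for _, name in sorted(enumerate(files), key=sort_key)]
-- ===== Notes on version B (the rewrite author's own statement) =====
-- stated objective: simpler
-- what changed: Replaces A's flag-machine character loop building three words plus an index-quadruple table and a final index re-lookup pass by a decorate-and-sort over enumerate(files): two boundary scans locate the digit run, the key is built from slices, and the sorted pairs are unpacked directly.
import Mathlib
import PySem

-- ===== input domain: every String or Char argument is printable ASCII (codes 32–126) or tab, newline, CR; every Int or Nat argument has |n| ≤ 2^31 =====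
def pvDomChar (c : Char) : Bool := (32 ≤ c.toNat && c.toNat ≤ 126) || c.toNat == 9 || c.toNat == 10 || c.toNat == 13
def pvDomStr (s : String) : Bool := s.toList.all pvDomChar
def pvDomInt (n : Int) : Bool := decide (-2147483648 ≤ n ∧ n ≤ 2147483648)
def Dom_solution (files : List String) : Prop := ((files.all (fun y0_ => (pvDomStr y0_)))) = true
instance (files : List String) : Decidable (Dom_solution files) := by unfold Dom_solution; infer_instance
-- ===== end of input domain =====

-- B replaces A's flag-machine char loop + index-quadruple table + final re-lookup pass by a
-- decorate-and-sort over enumerate(files) with keys built from two boundary scans and slices (simpler).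

-- ===== PORT A =====
-- Python's 3-tuple sort key (head : str, number : int, index : int), encoded order-isomorphically
-- as a List Int compared lexicographically (shared by both ports): the head's code points, then a
-- -1 sentinel (below every admitted code point, so a strict-prefix head sorts first exactly as
-- Python's str order does on the ASCII domain), then the number, then the index.
def keyEnc (head : String) (num idx : Int) : List Int :=
  head.toList.map (fun c => (c.toNat : Int)) ++ [-1, num, idx]

-- inner char loop of A: state (word_1, word_2, word_3, flag_1, flag_2)
def aStep (acc : List Char × List Char × List Char × Int × Int) (c : Char) :
    List Char × List Char × List Char × Int × Int :=
  if !(PySem.Chars.isdigit c) && acc.2.2.2.1 == 0 then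
    (acc.1 ++ [c], acc.2.1, acc.2.2.1, acc.2.2.2.1, acc.2.2.2.2)
  else if PySem.Chars.isdigit c && acc.2.2.2.2 == 0 then
    (acc.1, acc.2.1 ++ [c], acc.2.2.1, 1, acc.2.2.2.2)
  else
    (acc.1, acc.2.1, acc.2.2.1 ++ [c], acc.2.2.2.1, 1)

-- one iteration of A's outer loop: word_list = [word_1.lower(), int(word_2), word_3, i];
-- int(word_2) raises ValueError when word_2 = '' (no digit in the name): Pre_solution excludes
-- exactly those inputs, so the `.getD 0` default is never reached on admitted inputs.
def aParse (name : String) (i : Int) : String × Int × String × Int :=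
  let st := name.toList.foldl aStep ([], [], [], 0, 0)
  (String.ofList (PySem.Chars.lower st.1), (PySem.Int.ofChars? st.2.1).getD 0,
   String.ofList st.2.2.1, i)

def solution (files : List String) : List String :=
  -- first loop: array.append(word_list); files[i] is always in range, so pyGetD = Python indexing
  let array := (PySem.List.pyRange 0 (files.length : Int) 1).foldl
    (fun acc i => acc ++ [aParse (PySem.List.pyGetD files i "") i]) []
  -- sorted(array, key = lambda x: (x[0], x[1], x[3])): Python's tuple order, encoded by keyEnc
  let arr2 := PySem.List.sorted array
    (fun x => keyEnc x.1 x.2.1 x.2.2.2) false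
  -- second loop: answer.append(files[array[i][3]]); the stored index is always in range
  (PySem.List.pyRange 0 (arr2.length : Int) 1).foldl
    (fun acc i => acc ++ [PySem.List.pyGetD files
      ((PySem.List.pyGetD arr2 i ("", 0, "", 0)).2.2.2) ""]) []

-- ===== PORT B =====
-- B's two while loops advance s past the non-digit prefix and e past the digit run: their final
-- values are the lengths of the matching takeWhile prefixes (exact: both scans stop inside the
-- string). name[:s] / name[s:e] are in-range slices = take/drop; int('') is outside Pre_solution.
def bKey (p : Int × String) : List Int :=
  let cs := p.2.toList
  let s := (cs.takeWhile (fun c => !PySem.Chars.isdigit c)).length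
  let e := s + ((cs.drop s).takeWhile (fun c => PySem.Chars.isdigit c)).length
  keyEnc (String.ofList (PySem.Chars.lower (cs.take s)))
    ((PySem.Int.ofChars? ((cs.drop s).take (e - s))).getD 0) p.1

def solution_alt (files : List String) : List String :=
  (PySem.List.sorted (PySem.List.enumerate files 0) bKey false).map (·.2)

-- ===== PRECONDITION & SPEC =====
-- Pre_ excludes exactly the inputs where A raises ValueError: a filename containing no digit
-- makes A compute int('') (and B does the same); nothing A returns on is excluded.
def Pre_solution (files : List String) : Prop :=
  (files.all (fun s => s.toList.any (fun c => PySem.Chars.isdigit c))) = true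
instance (files : List String) : Decidable (Pre_solution files) := by
  unfold Pre_solution; infer_instance

def pvWitness_solution : List String := ["img12.png", "IMG10.PNG", "F-5"]

def Spec_solution (files : List String) (out : List String) : Prop := out = solution_alt files
instance (files : List String) (out : List String) : Decidable (Spec_solution files out) := by
  unfold Spec_solution; infer_instance

-- ===== CLAIM (what is proved, stated in full; the proofs are below) =====
def Claim_equal_solution : Prop :=
  ∀ (files : List String), Dom_solution files → Pre_solution files →
    Spec_solution files (solution files)

-- ===== LEMMAS AND PROOFS =====

theorem drop_len_takeWhile (p : Char → Bool) (l : List Char) :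
    l.drop (l.takeWhile p).length = l.dropWhile p := by
  calc l.drop (l.takeWhile p).length
      = (l.takeWhile p ++ l.dropWhile p).drop (l.takeWhile p).length := by
        rw [List.takeWhile_append_dropWhile]
    _ = l.dropWhile p := List.drop_left

theorem take_len_takeWhile (p : Char → Bool) (l : List Char) :
    l.take (l.takeWhile p).length = l.takeWhile p :=
  (List.prefix_iff_eq_take.mp (List.takeWhile_prefix p)).symm

-- folding A's step over non-digits only extends word_1 (flags stay 0, word_3 stays empty)
theorem aFold_nondigit (l : List Char) (h : ∀ c ∈ l, PySem.Chars.isdigit c = false)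
    (w1 w2 : List Char) :
    l.foldl aStep (w1, w2, [], 0, 0) = (w1 ++ l, w2, [], 0, 0) := by
  induction l generalizing w1 with
  | nil => simp
  | cons c t ih =>
    have hc : PySem.Chars.isdigit c = false := h c (by simp)
    rw [List.foldl_cons,
      show aStep (w1, w2, [], 0, 0) c = (w1 ++ [c], w2, [], 0, 0) by simp [aStep, hc],
      ih (fun x hx => h x (by simp [hx])) (w1 ++ [c])]
    simp

-- folding A's step over digits only extends word_2 (flag_2 stays 0, word_3 stays empty)
theorem aFold_digit (l : List Char) (h : ∀ c ∈ l, PySem.Chars.isdigit c = true)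
    (w1 w2 : List Char) (f1 : Int) :
    l.foldl aStep (w1, w2, [], f1, 0) =
      (w1, w2 ++ l, [], if l = [] then f1 else 1, 0) := by
  induction l generalizing w2 f1 with
  | nil => simp
  | cons c t ih =>
    have hc : PySem.Chars.isdigit c = true := h c (by simp)
    rw [List.foldl_cons,
      show aStep (w1, w2, [], f1, 0) c = (w1, w2 ++ [c], [], 1, 0) by simp [aStep, hc],
      ih (fun x hx => h x (by simp [hx])) (w2 ++ [c]) 1]
    rcases t with _ | _ <;> simp

-- once flag_1 = 1 and flag_2 = 1, every remaining character goes to word_3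
theorem aFold_tail (l : List Char) (w1 w2 w3 : List Char) :
    l.foldl aStep (w1, w2, w3, 1, 1) = (w1, w2, w3 ++ l, 1, 1) := by
  induction l generalizing w3 with
  | nil => simp
  | cons c t ih =>
    rw [List.foldl_cons,
      show aStep (w1, w2, w3, 1, 1) c = (w1, w2, w3 ++ [c], 1, 1) by simp [aStep], ih]
    simp

-- characterisation of A's inner loop: word_1 is the non-digit prefix, word_2 the first digit run
theorem aFold_eq (cs : List Char) :
    (cs.foldl aStep ([], [], [], 0, 0)).1
        = cs.takeWhile (fun c => !PySem.Chars.isdigit c) ∧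
      (cs.foldl aStep ([], [], [], 0, 0)).2.1
        = (cs.dropWhile (fun c => !PySem.Chars.isdigit c)).takeWhile
            (fun c => PySem.Chars.isdigit c) := by
  have ht1 : ∀ c ∈ cs.takeWhile (fun c => !PySem.Chars.isdigit c),
      PySem.Chars.isdigit c = false := by
    intro c hc
    simpa using List.mem_takeWhile_imp hc
  have ht2 : ∀ c ∈ (cs.dropWhile (fun c => !PySem.Chars.isdigit c)).takeWhile
      (fun c => PySem.Chars.isdigit c), PySem.Chars.isdigit c = true := by
    intro c hc
    simpa using List.mem_takeWhile_imp hc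
  have h0 : cs.foldl aStep ([], [], [], 0, 0) =
      (cs.dropWhile (fun c => !PySem.Chars.isdigit c)).foldl aStep
        (cs.takeWhile (fun c => !PySem.Chars.isdigit c), [], [], 0, 0) := by
    conv_lhs => rw [show cs = cs.takeWhile (fun c => !PySem.Chars.isdigit c)
      ++ cs.dropWhile (fun c => !PySem.Chars.isdigit c)
      from (List.takeWhile_append_dropWhile).symm]
    rw [List.foldl_append, aFold_nondigit _ ht1 [] []]
    simp
  set r := cs.dropWhile (fun c => !PySem.Chars.isdigit c) with hr
  set t2 := r.takeWhile (fun c => PySem.Chars.isdigit c) with ht2d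
  have h1 : cs.foldl aStep ([], [], [], 0, 0) =
      (r.dropWhile (fun c => PySem.Chars.isdigit c)).foldl aStep
        (cs.takeWhile (fun c => !PySem.Chars.isdigit c), t2, [],
          if t2 = [] then 0 else 1, 0) := by
    rw [h0]
    conv_lhs => rw [show r = t2 ++ r.dropWhile (fun c => PySem.Chars.isdigit c)
      from (List.takeWhile_append_dropWhile).symm]
    rw [List.foldl_append, aFold_digit _ ht2 _ [] 0]
    simp
  rcases hr2 : r.dropWhile (fun c => PySem.Chars.isdigit c) with _ | ⟨c, t⟩
  · rw [h1, hr2]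
    simp
  · have hc : PySem.Chars.isdigit c = false := by
      have hne : r.dropWhile (fun c => PySem.Chars.isdigit c) ≠ [] := by
        rw [hr2]; simp
      have := List.head_dropWhile_not (fun c => PySem.Chars.isdigit c) hne
      simp only [hr2, List.head_cons] at this
      simpa using this
    have ht2ne : t2 ≠ [] := by
      intro h0'
      have hrne : r ≠ [] := by
        intro hre
        rw [hre] at hr2
        simp at hr2
      have hhead := List.head_dropWhile_not (fun c => !PySem.Chars.isdigit c)
        (l := cs) (by rw [← hr]; exact hrne)
      have hrc : r = c :: t := by
        conv_lhs => rw [show r = t2 ++ r.dropWhile (fun c => PySem.Chars.isdigit c)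
          from (List.takeWhile_append_dropWhile).symm]
        rw [h0', hr2]
        simp
      simp only [← hr] at hhead
      simp only [hrc, List.head_cons] at hhead
      simp [hc] at hhead
    rw [h1, hr2, if_neg ht2ne]
    have hstep : aStep (cs.takeWhile (fun c => !PySem.Chars.isdigit c), t2, [], 1, 0) c
        = (cs.takeWhile (fun c => !PySem.Chars.isdigit c), t2, [c], 1, 1) := by
      simp only [aStep, hc]
      rw [show ((!false && ((1 : Int) == 0)) = false) by simp]
      rw [show ((false && ((0 : Int) == 0)) = false) from rfl]
      simp
    rw [List.foldl_cons, hstep, aFold_tail]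
    exact ⟨rfl, rfl⟩

-- A's sort key of the parsed quadruple is B's key of the enumerate pair
theorem key_eq (p : Int × String) :
    keyEnc (aParse p.2 p.1).1 (aParse p.2 p.1).2.1 (aParse p.2 p.1).2.2.2 = bKey p := by
  obtain ⟨ha1, ha2⟩ := aFold_eq p.2.toList
  simp only [aParse, bKey]
  rw [ha1, ha2, take_len_takeWhile, drop_len_takeWhile, Nat.add_sub_cancel_left,
    take_len_takeWhile]

-- insertBy commutes with map when the comparison factors through the map
theorem insertBy_map {α β : Type} (f : α → β) (bA : α → α → Bool) (bB : β → β → Bool)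
    (hb : ∀ x y, bA x y = bB (f x) (f y)) (x : α) (ys : List α) :
    (PySem.List.insertBy bA x ys).map f = PySem.List.insertBy bB (f x) (ys.map f) := by
  induction ys with
  | nil => simp [PySem.List.insertBy]
  | cons y t ih =>
    simp only [PySem.List.insertBy, List.map_cons, hb]
    by_cases h : bB (f x) (f y) = true <;> simp [h, ih]

-- sorting a mapped list = mapping the sort by the composed key (sorted is an insertBy fold)
theorem sorted_map_comm {α β κ : Type} [LT κ] [DecidableLT κ] (f : α → β) (key : β → κ)
    (l : List α) :
    PySem.List.sorted (l.map f) key false =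
      (PySem.List.sorted l (fun x => key (f x)) false).map f := by
  rw [PySem.List.sorted_eq_foldl_insertBy, PySem.List.sorted_eq_foldl_insertBy,
    List.foldl_map]
  have : ∀ (acc : List α),
      (l.foldl (fun acc x => PySem.List.insertBy
        (fun a b => decide (key (f a) < key (f b))) x acc) acc).map f =
      l.foldl (fun acc y => PySem.List.insertBy
        (fun a b => decide (key a < key b)) (f y) acc) (acc.map f) := by
    induction l with
    | nil => intro acc; simp
    | cons x t ih =>
      intro acc
      simp only [List.foldl_cons]
      rw [ih, insertBy_map f (fun a b => decide (key (f a) < key (f b)))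
        (fun a b => decide (key a < key b)) (fun a b => rfl) x acc]
  exact (this []).symm

-- ===== VERDICT (by name: the statement is the Claim_ definition above) =====
theorem solution_spec : Claim_equal_solution := by
  intro files _ _
  unfold Spec_solution solution solution_alt
  simp only [PySem.List.foldl_append_singleton_eq_map, List.nil_append]
  have harr : (PySem.List.pyRange 0 (files.length : Int) 1).map
      (fun i => aParse (PySem.List.pyGetD files i "") i)
      = (PySem.List.enumerate files 0).map (fun p => aParse p.2 p.1) := by
    rw [PySem.List.enumerate_eq_map_pyRange files "", List.map_map]
    rfl
  rw [harr, sorted_map_comm (fun p : Int × String => aParse p.2 p.1)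
    (fun x => keyEnc x.1 x.2.1 x.2.2.2) (PySem.List.enumerate files 0)]
  rw [show (fun x : Int × String =>
      (fun q : String × Int × String × Int => keyEnc q.1 q.2.1 q.2.2.2)
        ((fun p : Int × String => aParse p.2 p.1) x)) = bKey from funext fun p => key_eq p]
  have h2 : ∀ (L : List (String × Int × String × Int)),
      List.map (fun x => PySem.List.pyGetD files
          (PySem.List.pyGetD L x ("", 0, "", 0)).2.2.2 "")
        (PySem.List.pyRange 0 (L.length : Int))
      = L.map (fun q => PySem.List.pyGetD files q.2.2.2 "") := by
    intro L
    conv_rhs => rw [← PySem.List.map_pyGetD_pyRange_zero' L ("", 0, "", 0)]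
    simp only [List.map_map, Function.comp_def]
  rw [h2, List.map_map]
  refine List.map_congr_left ?_
  intro p hp
  have hpe : p ∈ PySem.List.enumerate files 0 :=
    (PySem.List.mem_sorted _ _ _ _).mp hp
  obtain ⟨k, hk, rfl⟩ := (PySem.List.mem_enumerate_iff _ _ _).mp hpe
  show PySem.List.pyGetD files ((0 : Int) + (k : Int)) "" = files[k]
  rw [zero_add, PySem.List.pyGetD_natCast]
  exact List.getD_eq_getElem files "" hk
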